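-- pv_equiv track=rewrite | github.com/cutright/DVHA-DICOM-Editor | dvhaedit/utilities.py | get_sorted_indices
-- ===== SOURCE A (Python) =====
-- def get_sorted_indices(some_list):
--     try:
--         return [i[0] for i in sorted(enumerate(some_list), key=lambda x: x[1])]
--     except TypeError:  # can't sort if a mix of str and float
--         try:
--             temp_data = [[value, -float('inf')][value == 'None'] for value in some_list]
--             return [i[0] for i in sorted(enumerate(temp_data), key=lambda x: x[1])]
--         except TypeError:
--             temp_data = [str(value) for value in some_list]
--             return [i[0] for i in sorted(enumerate(temp_data), key=lambda x: x[1])]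
-- ===== SOURCE B (Python) =====
-- def get_sorted_indices(some_list):
--     remaining = list(range(len(some_list)))
--     result = []
--     while remaining:
--         best = remaining[0]
--         for i in remaining[1:]:
--             if some_list[i] < some_list[best]:
--                 best = i
--         remaining.remove(best)
--         result.append(best)
--     return result
-- ===== Notes on version B (the rewrite author's own statement) =====
-- stated objective: alternative
-- what changed: A builds enumerate pairs and calls the builtin stable key-sort inside a TypeError-fallback ladder (dead code for int lists); B is a selection sort over indices that repeatedly scans for the index with the smallest value (first index on ties) and removes it.
import Mathlib
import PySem

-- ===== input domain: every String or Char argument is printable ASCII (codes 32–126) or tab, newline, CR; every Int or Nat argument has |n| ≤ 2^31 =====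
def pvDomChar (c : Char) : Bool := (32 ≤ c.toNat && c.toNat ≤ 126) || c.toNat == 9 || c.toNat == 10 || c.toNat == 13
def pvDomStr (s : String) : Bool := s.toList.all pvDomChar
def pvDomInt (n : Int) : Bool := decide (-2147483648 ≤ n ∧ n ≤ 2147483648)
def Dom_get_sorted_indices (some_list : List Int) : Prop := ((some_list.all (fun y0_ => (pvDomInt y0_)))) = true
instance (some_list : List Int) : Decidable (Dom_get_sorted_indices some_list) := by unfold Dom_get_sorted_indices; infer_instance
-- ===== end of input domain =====

-- B replaces A's builtin stable key-sort (whose TypeError fallback ladder is dead code for int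
-- lists) by a selection sort over indices: alternative algorithm, same return values.

-- ===== PORT A =====
-- On lists of ints the try body never raises TypeError, so the two except branches are
-- unreachable on the stated domain; the port is the try body.
def get_sorted_indices (some_list : List Int) : List Int :=
  (PySem.List.sorted (PySem.List.enumerate some_list 0) (fun x => x.2) false).map (fun i => i.1)

-- ===== PORT B =====
-- the inner 'for i in remaining[1:]' scan of Source B, as a named fold
def pvSelect (l : List Int) (b : Int) (rest : List Int) : Int :=
  rest.foldl (fun b i => if PySem.List.pyGetD l i 0 < PySem.List.pyGetD l b 0 then i else b) b

-- membership fact cited by the port's termination proof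
theorem pvSelMem (l : List Int) : ∀ (rest : List Int) (b : Int), pvSelect l b rest ∈ b :: rest := by
  intro rest
  induction rest with
  | nil => intro b; simp [pvSelect]
  | cons x rest ih =>
    intro b
    simp only [pvSelect, List.foldl_cons]
    rcases List.mem_cons.mp (ih (if PySem.List.pyGetD l x 0 < PySem.List.pyGetD l b 0 then x else b)) with h | h
    · rw [show rest.foldl _ _ = pvSelect l _ rest from rfl, h]; split_ifs <;> simp
    · exact List.mem_cons_of_mem _ (List.mem_cons_of_mem _ h)

-- the 'while remaining' loop of Source B
def pvBLoop (l : List Int) (remaining : List Int) : List Int :=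
  match remaining with
  | [] => []
  | r0 :: rest =>
    pvSelect l r0 rest ::
      pvBLoop l ((PySem.List.remove? (r0 :: rest) (pvSelect l r0 rest)).getD [])
termination_by remaining.length
decreasing_by
  rw [PySem.List.remove?_eq_some_erase _ _ (pvSelMem l rest r0)]
  simp only [Option.getD_some]
  have := List.length_erase_of_mem (pvSelMem l rest r0)
  simp [this]

def get_sorted_indices_alt (some_list : List Int) : List Int :=
  pvBLoop some_list (PySem.List.pyRange 0 some_list.length 1)

-- ===== PRECONDITION & SPEC =====
def Spec_get_sorted_indices (some_list : List Int) (out : List Int) : Prop := out = get_sorted_indices_alt some_list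
instance (some_list : List Int) (out : List Int) : Decidable (Spec_get_sorted_indices some_list out) := by unfold Spec_get_sorted_indices; infer_instance

-- ===== CLAIM (what is proved, stated in full; the proofs are below) =====
def Claim_equal_get_sorted_indices : Prop := ∀ (some_list : List Int), Dom_get_sorted_indices some_list → Spec_get_sorted_indices some_list (get_sorted_indices some_list)

-- ===== LEMMAS AND PROOFS =====

-- strict lexicographic order on (index, value) pairs: value first, index on ties
def pvLex (p q : Int × Int) : Prop := p.2 < q.2 ∨ (p.2 = q.2 ∧ p.1 < q.1)

theorem pvLex_trans {a b c : Int × Int} (h1 : pvLex a b) (h2 : pvLex b c) : pvLex a c := by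
  unfold pvLex at *; omega

-- inserting x after all smaller-index elements keeps the accumulator pvLex-sorted
theorem pvInsertBy_pairwise (x : Int × Int) (acc : List (Int × Int))
    (hp : acc.Pairwise pvLex) (hlt : ∀ a ∈ acc, a.1 < x.1) :
    (PySem.List.insertBy (fun a b => decide (a.2 < b.2)) x acc).Pairwise pvLex := by
  induction acc with
  | nil => simp [PySem.List.insertBy, pvLex]
  | cons y acc ih =>
    simp only [PySem.List.insertBy]
    split_ifs with h
    · simp only [decide_eq_true_eq] at h
      refine List.Pairwise.cons ?_ hp
      intro z hz
      rcases List.mem_cons.mp hz with rfl | hz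
      · exact Or.inl h
      · exact pvLex_trans (Or.inl h) ((List.pairwise_cons.mp hp).1 z hz)
    · simp only [decide_eq_true_eq] at h
      have hp' := List.pairwise_cons.mp hp
      refine List.Pairwise.cons ?_ (ih hp'.2 (fun a ha => hlt a (List.mem_cons_of_mem _ ha)))
      intro z hz
      rcases (PySem.List.mem_insertBy _ _ _ _).mp hz with rfl | hz
      · have hy : y.1 < z.1 := hlt y (List.mem_cons_self ..)
        unfold pvLex; omega
      · exact hp'.1 z hz

-- the insertion-sort foldl keeps the accumulator pvLex-sorted when inputs come in index order
theorem pvFoldl_pairwise : ∀ (ps acc : List (Int × Int)),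
    ps.Pairwise (fun p q => p.1 < q.1) → acc.Pairwise pvLex →
    (∀ a ∈ acc, ∀ p ∈ ps, a.1 < p.1) →
    (ps.foldl (fun acc x => PySem.List.insertBy (fun a b => decide (a.2 < b.2)) x acc) acc).Pairwise pvLex := by
  intro ps
  induction ps with
  | nil => intro acc _ hacc _; simpa using hacc
  | cons x ps ih =>
    intro acc hps hacc hlt
    have hps' := List.pairwise_cons.mp hps
    simp only [List.foldl_cons]
    refine ih _ hps'.2 (pvInsertBy_pairwise x acc hacc (fun a ha => hlt a ha x (List.mem_cons_self ..))) ?_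
    intro a ha p hp
    rcases (PySem.List.mem_insertBy _ _ _ _).mp ha with rfl | ha
    · exact hps'.1 p hp
    · exact hlt a ha p (List.mem_cons_of_mem _ hp)

-- A's stable sort of enumerate(l) is pvLex-sorted (stability: ties keep index order)
theorem pvSorted_pairwise (l : List Int) :
    (PySem.List.sorted (PySem.List.enumerate l 0) (fun x => x.2) false).Pairwise pvLex := by
  rw [PySem.List.sorted_eq_foldl_insertBy]
  exact pvFoldl_pairwise _ [] (PySem.List.pairwise_lt_enumerate ..) (by simp) (by simp)

-- the selection scan returns a pvLex-minimal element of b :: rest, when b is below every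
-- element of rest and rest is strictly increasing
theorem pvSelSpec (l : List Int) : ∀ (rest : List Int) (b : Int),
    (∀ i ∈ rest, b < i) → rest.Pairwise (· < ·) →
    ∀ j ∈ b :: rest,
      j = pvSelect l b rest ∨
      pvLex (pvSelect l b rest, PySem.List.pyGetD l (pvSelect l b rest) 0)
            (j, PySem.List.pyGetD l j 0) := by
  intro rest
  induction rest with
  | nil => intro b _ _ j hj; simp at hj; simp [hj, pvSelect]
  | cons x rest ih =>
    intro b hb hpw j hj
    have hpw' := List.pairwise_cons.mp hpw
    have hbx : b < x := hb x (List.mem_cons_self ..)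
    have hsel : pvSelect l b (x :: rest) =
        pvSelect l (if PySem.List.pyGetD l x 0 < PySem.List.pyGetD l b 0 then x else b) rest := by
      simp [pvSelect]
    rw [hsel]
    have hrest' : ∀ i ∈ rest, (if PySem.List.pyGetD l x 0 < PySem.List.pyGetD l b 0 then x else b) < i := by
      intro i hi
      have h1 := hpw'.1 i hi
      have h2 := hb i (List.mem_cons_of_mem _ hi)
      split_ifs <;> omega
    have ihall := ih _ hrest' hpw'.2
    have key : ∀ j₀, (j₀ = b ∨ j₀ = x) →
        j₀ = (if PySem.List.pyGetD l x 0 < PySem.List.pyGetD l b 0 then x else b) ∨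
        pvLex ((if PySem.List.pyGetD l x 0 < PySem.List.pyGetD l b 0 then x else b),
               PySem.List.pyGetD l (if PySem.List.pyGetD l x 0 < PySem.List.pyGetD l b 0 then x else b) 0)
              (j₀, PySem.List.pyGetD l j₀ 0) := by
      intro j₀ hj₀
      rcases hj₀ with rfl | rfl <;> split_ifs with hv
      · exact Or.inr (Or.inl hv)
      · exact Or.inl rfl
      · exact Or.inl rfl
      · right; unfold pvLex; simp only []; omega
    have main : ∀ j₀,
        (j₀ = (if PySem.List.pyGetD l x 0 < PySem.List.pyGetD l b 0 then x else b) ∨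
         pvLex ((if PySem.List.pyGetD l x 0 < PySem.List.pyGetD l b 0 then x else b),
                PySem.List.pyGetD l (if PySem.List.pyGetD l x 0 < PySem.List.pyGetD l b 0 then x else b) 0)
               (j₀, PySem.List.pyGetD l j₀ 0)) →
        (j₀ = pvSelect l (if PySem.List.pyGetD l x 0 < PySem.List.pyGetD l b 0 then x else b) rest ∨
         pvLex (pvSelect l (if PySem.List.pyGetD l x 0 < PySem.List.pyGetD l b 0 then x else b) rest,
                PySem.List.pyGetD l (pvSelect l (if PySem.List.pyGetD l x 0 < PySem.List.pyGetD l b 0 then x else b) rest) 0)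
               (j₀, PySem.List.pyGetD l j₀ 0)) := by
      intro j₀ h
      rcases h with h | hlex
      · rw [h]; exact ihall _ (List.mem_cons_self ..)
      · rcases ihall _ (List.mem_cons_self ..) with hmb | hmlex
        · rw [hmb] at hlex; exact Or.inr hlex
        · exact Or.inr (pvLex_trans hmlex hlex)
    rcases List.mem_cons.mp hj with h1 | h2
    · exact main j (key j (Or.inl h1))
    · rcases List.mem_cons.mp h2 with h3 | h4
      · exact main j (key j (Or.inr h3))
      · exact ihall j (List.mem_cons_of_mem _ h4)

-- the selection-sort loop returns a pvLex-sorted permutation of its (strictly increasing) input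
theorem pvBLoop_spec (l : List Int) : ∀ (n : Nat) (remaining : List Int),
    remaining.length ≤ n → remaining.Pairwise (· < ·) →
    (pvBLoop l remaining).Perm remaining ∧
    ((pvBLoop l remaining).map (fun i => (i, PySem.List.pyGetD l i 0))).Pairwise pvLex := by
  intro n
  induction n with
  | zero =>
    intro remaining hlen _
    have : remaining = [] := List.eq_nil_of_length_eq_zero (Nat.le_zero.mp hlen)
    subst this; rw [pvBLoop.eq_def]; simp
  | succ n ih =>
    intro remaining hlen hpw
    match remaining with
    | [] => rw [pvBLoop.eq_def]; simp
    | r0 :: rest =>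
      rw [pvBLoop.eq_def]
      simp only []
      have hmem : pvSelect l r0 rest ∈ r0 :: rest := pvSelMem l rest r0
      have hrem' : (PySem.List.remove? (r0 :: rest) (pvSelect l r0 rest)).getD [] =
          (r0 :: rest).erase (pvSelect l r0 rest) := by
        rw [PySem.List.remove?_eq_some_erase _ _ hmem]; rfl
      have hnd : (r0 :: rest).Nodup := (hpw.imp (fun h => by omega)).nodup
      have hpw'' : ((PySem.List.remove? (r0 :: rest) (pvSelect l r0 rest)).getD []).Pairwise (· < ·) :=
        hrem' ▸ hpw.sublist (List.erase_sublist ..)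
      have hlen' : ((PySem.List.remove? (r0 :: rest) (pvSelect l r0 rest)).getD []).length ≤ n := by
        rw [hrem']
        have := List.length_erase_of_mem hmem
        simp only [this]
        simp only [List.length_cons] at hlen ⊢
        omega
      obtain ⟨ihp, ihs⟩ := ih _ hlen' hpw''
      have hmin := pvSelSpec l rest r0 (fun i hi => List.rel_of_pairwise_cons hpw hi) ((List.pairwise_cons.mp hpw).2)
      constructor
      · have p1 : (pvBLoop l ((PySem.List.remove? (r0 :: rest) (pvSelect l r0 rest)).getD [])).Perm
            ((r0 :: rest).erase (pvSelect l r0 rest)) := hrem' ▸ ihp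
        exact (p1.cons _).trans (List.perm_cons_erase hmem).symm
      · simp only [List.map_cons]
        refine List.Pairwise.cons ?_ ihs
        intro z hz
        simp only [List.mem_map] at hz
        obtain ⟨j, hj, rfl⟩ := hz
        have hj' : j ∈ (PySem.List.remove? (r0 :: rest) (pvSelect l r0 rest)).getD [] :=
          (ihp.mem_iff).mp hj
        rw [hrem'] at hj'
        have hjmem : j ∈ r0 :: rest := (List.erase_sublist ..).mem hj'
        have hjne : j ≠ pvSelect l r0 rest := by
          intro h; subst h
          exact List.Nodup.not_mem_erase hnd hj'
        rcases hmin j hjmem with h | h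
        · exact absurd h hjne
        · exact h

-- uniqueness: two pvLex-sorted permutations of the same multiset are equal
theorem pvSorted_unique (xs ys : List (Int × Int)) (hperm : xs.Perm ys)
    (hx : xs.Pairwise pvLex) (hy : ys.Pairwise pvLex) : xs = ys := by
  refine hperm.eq_of_pairwise ?_ hx hy
  intro a b _ _ h1 h2
  obtain ⟨a1, a2⟩ := a; obtain ⟨b1, b2⟩ := b
  unfold pvLex at h1 h2
  simp only [Prod.mk.injEq]
  constructor <;> omega

-- ===== VERDICT (by name: the statement is the Claim_ definition above) =====
theorem get_sorted_indices_spec : Claim_equal_get_sorted_indices := by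
  intro l _
  unfold Spec_get_sorted_indices get_sorted_indices get_sorted_indices_alt
  have hrpw : (PySem.List.pyRange 0 l.length 1).Pairwise (· < ·) := PySem.List.pairwise_lt_pyRange_one ..
  obtain ⟨hperm, hsorted⟩ := pvBLoop_spec l (PySem.List.pyRange 0 l.length 1).length _ (le_refl _) hrpw
  have hmapperm : ((pvBLoop l (PySem.List.pyRange 0 l.length 1)).map (fun i => (i, PySem.List.pyGetD l i 0))).Perm
      (PySem.List.enumerate l 0) := by
    rw [PySem.List.enumerate_eq_map_pyRange (d := 0)]
    exact hperm.map _
  have hS := pvSorted_pairwise l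
  have hSperm : (PySem.List.sorted (PySem.List.enumerate l 0) (fun x => x.2) false).Perm (PySem.List.enumerate l 0) :=
    PySem.List.sorted_perm ..
  have heq := pvSorted_unique _ _ (hSperm.trans hmapperm.symm) hS hsorted
  rw [heq, List.map_map]
  exact List.map_id _
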